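-- pv_equiv track=rewrite | github.com/jerryczy/csc401_nlp | statistical_machine_translation/preprocess.py | seperate_puct
-- ===== SOURCE A (Python) =====
-- import re, string
--
-- def seperate_puct(text):
--     newtext = ' '
--     # seperate leading puncuations
--     for i in range(len(text)):
--         if text[i] in string.punctuation:
--             newtext += text[i] + ' '
--         else:
--             text = text[i:]
--             break
--
--     # seperate the ending punctuation
--     for i in range(len(text)-1, -1, -1):
--         if text[i] not in string.punctuation:
--             newtext += text[:i+1] + ' '
--             for j in text[i+1:]:
--                 newtext += j + ' '
--             break
--     return newtext.strip()
-- ===== SOURCE B (Python) =====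
-- import string
--
-- def seperate_puct(text):
--     left = text.lstrip(string.punctuation)
--     core = left.rstrip(string.punctuation)
--     leading = text[:len(text) - len(left)]
--     trailing = left[len(core):]
--     tokens = list(leading) + ([core] if core else []) + list(trailing)
--     return ' '.join(tokens).strip()
-- ===== Notes on version B (the rewrite author's own statement) =====
-- stated objective: simpler
-- what changed: B replaces A's two index loops with per-character string appending (plus an inner loop re-appending the trailing part) by a single lstrip/rstrip segmentation into leading punctuation, core and trailing punctuation, composed with one space-join and a final strip.
import Mathlib
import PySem

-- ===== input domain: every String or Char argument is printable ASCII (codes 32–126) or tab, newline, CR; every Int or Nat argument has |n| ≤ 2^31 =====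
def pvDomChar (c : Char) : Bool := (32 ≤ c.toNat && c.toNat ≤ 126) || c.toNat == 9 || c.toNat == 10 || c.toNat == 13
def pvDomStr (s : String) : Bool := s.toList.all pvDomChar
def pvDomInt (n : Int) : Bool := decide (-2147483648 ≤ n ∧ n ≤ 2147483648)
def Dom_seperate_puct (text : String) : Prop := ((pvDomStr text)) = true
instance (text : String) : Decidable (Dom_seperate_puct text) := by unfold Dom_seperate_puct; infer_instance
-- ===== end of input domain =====

-- B segments the string once with lstrip/rstrip over the punctuation set and joins the
-- pieces, instead of A's two index loops with character-by-character appending (objective: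
-- simpler; same asymptotic cost).

-- membership in string.punctuation (ASCII 33-47, 58-64, 91-96, 123-126)
def pvIsPunct (c : Char) : Bool :=
  (33 ≤ c.toNat && c.toNat ≤ 47) || (58 ≤ c.toNat && c.toNat ≤ 64) ||
  (91 ≤ c.toNat && c.toNat ≤ 96) || (123 ≤ c.toNat && c.toNat ≤ 126)

-- ===== PORT A =====
-- first loop: 'for i in range(len(text)): if punct: newtext += text[i]+" " else: text = text[i:]; break'
-- (if the loop finishes without break, text is left unchanged = orig)
def pvLeadLoop (orig : List Char) : List Char → List Char → List Char × List Char
  | [], nt => (nt, orig)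
  | c :: rest, nt =>
    if pvIsPunct c then pvLeadLoop orig rest (nt ++ [c, ' ']) else (nt, c :: rest)

-- second loop: 'for i in range(len(text)-1,-1,-1): if not punct: newtext += text[:i+1]+" "; for j in text[i+1:]: newtext += j+" "; break'
def pvTailLoop (t : List Char) : Nat → List Char → List Char
  | 0, nt => nt
  | n + 1, nt =>
    if pvIsPunct (t.getD n ' ') then pvTailLoop t n nt
    else (t.drop (n + 1)).foldl (fun a j => a ++ [j, ' ']) (nt ++ t.take (n + 1) ++ [' '])

def seperate_puct (text : String) : String :=
  let r := pvLeadLoop text.toList text.toList [' ']   -- newtext = ' '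
  String.mk (PySem.Chars.strip (pvTailLoop r.2 r.2.length r.1))   -- newtext.strip()

-- ===== PORT B =====
def pvRStripPunct (l : List Char) : List Char := (l.reverse.dropWhile pvIsPunct).reverse

def seperate_puct_alt (text : String) : String :=
  let cs := text.toList
  let left := cs.dropWhile pvIsPunct                 -- text.lstrip(string.punctuation)
  let core := pvRStripPunct left                     -- left.rstrip(string.punctuation)
  let leading := cs.take (cs.length - left.length)   -- text[:len(text)-len(left)]
  let trailing := left.drop core.length              -- left[len(core):]
  let tokens := leading.map (fun c => [c]) ++
      (if core.isEmpty then [] else [core]) ++ trailing.map (fun c => [c])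
  String.mk (PySem.Chars.strip (PySem.Chars.join [' '] tokens))   -- ' '.join(tokens).strip()

-- ===== PRECONDITION & SPEC =====
def Spec_seperate_puct (text : String) (out : String) : Prop := out = seperate_puct_alt text
instance (text : String) (out : String) : Decidable (Spec_seperate_puct text out) := by unfold Spec_seperate_puct; infer_instance

-- ===== CLAIM (what is proved, stated in full; the proofs are below) =====
def Claim_equal_seperate_puct : Prop := ∀ (text : String), Dom_seperate_puct text → Spec_seperate_puct text (seperate_puct text)

-- ===== LEMMAS AND PROOFS =====

def pvFlat (l : List Char) : List Char := l.flatMap (fun c => [c, ' '])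
theorem pvLeadLoop_spec (orig : List Char) :
    ∀ (l nt : List Char), pvLeadLoop orig l nt =
      (nt ++ pvFlat (l.takeWhile pvIsPunct),
       if l.dropWhile pvIsPunct = [] then orig else l.dropWhile pvIsPunct) := by
  intro l
  induction l with
  | nil => intro nt; simp [pvLeadLoop, pvFlat]
  | cons c rest ih =>
    intro nt
    by_cases h : pvIsPunct c = true
    · simp [pvLeadLoop, h, ih, pvFlat]
    · simp at h
      simp [pvLeadLoop, h, pvFlat]

theorem pvRStripPunct_concat_punct (l : List Char) (c : Char) (h : pvIsPunct c = true) :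
    pvRStripPunct (l ++ [c]) = pvRStripPunct l := by
  simp [pvRStripPunct, List.dropWhile, h]

theorem pvRStripPunct_concat_not (l : List Char) (c : Char) (h : pvIsPunct c = false) :
    pvRStripPunct (l ++ [c]) = l ++ [c] := by
  simp [pvRStripPunct, List.dropWhile, h]

theorem pvTailLoop_spec (t : List Char) :
    ∀ (n : Nat) (nt : List Char), n ≤ t.length → (t.drop n).all pvIsPunct →
      pvTailLoop t n nt =
        if (t.take n).all pvIsPunct then nt
        else nt ++ pvRStripPunct (t.take n) ++ [' '] ++
          pvFlat (t.drop (pvRStripPunct (t.take n)).length) := by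
  intro n
  induction n with
  | zero => intro nt _ _; simp [pvTailLoop]
  | succ n ih =>
    intro nt hn hall
    have hlt : n < t.length := by omega
    have hget : t.getD n ' ' = t[n] := List.getD_eq_getElem t ' ' hlt
    have htake : t.take (n + 1) = t.take n ++ [t[n]] := by
      rw [List.take_add_one]; simp [List.getElem?_eq_getElem hlt]
    by_cases h : pvIsPunct t[n] = true
    · have hall' : (t.drop n).all pvIsPunct := by
        have hd : t.drop n = t[n] :: t.drop (n + 1) := List.drop_eq_getElem_cons hlt
        rw [hd, List.all_cons, h, hall]; rfl
      rw [pvTailLoop, if_pos (by rw [hget]; exact h), ih nt (by omega) hall']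
      rw [htake, pvRStripPunct_concat_punct _ _ h, List.all_append]
      simp [List.all_cons, h]
    · simp only [Bool.not_eq_true] at h
      rw [pvTailLoop, if_neg (by rw [hget, h]; simp)]
      rw [PySem.List.foldl_append_eq_flatMap (fun j => [j, ' '])]
      rw [htake, pvRStripPunct_concat_not _ _ h]
      rw [if_neg (by rw [List.all_append]; simp [h])]
      have hlen : (List.take n t ++ [t[n]]).length = n + 1 := by
        simp [List.length_take]; omega
      rw [hlen]
      simp [pvFlat]

theorem pvJoin_cons_ne_nil (sep x : List Char) (ys : List (List Char)) (h : ys ≠ []) :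
    PySem.Chars.join sep (x :: ys) = x ++ sep ++ PySem.Chars.join sep ys := by
  cases ys with
  | nil => exact absurd rfl h
  | cons y ys' => exact PySem.Chars.join_cons_cons sep x y ys'

theorem pvJoin_singletons_append (L : List Char) (parts : List (List Char)) (h : parts ≠ []) :
    PySem.Chars.join [' '] (L.map (fun c => [c]) ++ parts) =
      pvFlat L ++ PySem.Chars.join [' '] parts := by
  induction L with
  | nil => simp [pvFlat]
  | cons c L' ih =>
    have hne : L'.map (fun c => [c]) ++ parts ≠ [] := by
      simp [h]
    rw [List.map_cons, List.cons_append, pvJoin_cons_ne_nil [' '] [c] _ hne, ih]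
    simp [pvFlat]

theorem pvJoin_core_trailing (core : List Char) (T : List Char) (h : core ≠ []) :
    PySem.Chars.join [' '] (core :: T.map (fun c => [c])) ++ [' '] =
      core ++ [' '] ++ pvFlat T := by
  induction T generalizing core with
  | nil => simp [PySem.Chars.join_singleton, pvFlat]
  | cons t T' ih =>
    rw [List.map_cons, pvJoin_cons_ne_nil [' '] core _ (by simp)]
    have := ih [t] (by simp)
    simp only [List.append_assoc, this]
    simp [pvFlat]

theorem pvFlat_eq_join (cs : List Char) (h : cs ≠ []) :
    pvFlat cs = PySem.Chars.join [' '] (cs.map (fun c => [c])) ++ [' '] := by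
  cases cs with
  | nil => exact absurd rfl h
  | cons c cs' =>
    rw [List.map_cons]
    rw [pvJoin_core_trailing [c] cs' (by simp)]
    simp [pvFlat]

theorem pvRStrip_space (z : List Char) :
    PySem.Chars.rstrip (z ++ [' ']) = PySem.Chars.rstrip z := by
  simp [PySem.Chars.rstrip, List.dropWhile]
  rfl

theorem pvStrip_wrap (x : List Char) :
    PySem.Chars.strip ([' '] ++ x ++ [' ']) = PySem.Chars.strip x := by
  show PySem.Chars.rstrip (PySem.Chars.lstrip _) = PySem.Chars.rstrip (PySem.Chars.lstrip x)
  have h1 : PySem.Chars.lstrip ([' '] ++ x ++ [' ']) = PySem.Chars.lstrip (x ++ [' ']) := by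
    simp [PySem.Chars.lstrip, List.dropWhile]
    rfl
  rw [h1, PySem.Chars.lstrip, List.dropWhile_append]
  split
  · next hemp =>
    simp at hemp
    have hsp : PySem.Chars.isspace ' ' = true := by decide
    have hx : List.dropWhile PySem.Chars.isspace x = [] := List.dropWhile_eq_nil_iff.mpr hemp
    simp [PySem.Chars.lstrip, PySem.Chars.rstrip, hsp, hx]
  · next hemp =>
    rw [pvRStrip_space]
    rfl

theorem pvDropWhile_head_false (l : List Char) (c : Char) (rest : List Char)
    (h : l.dropWhile pvIsPunct = c :: rest) : pvIsPunct c = false := by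
  induction l with
  | nil => simp at h
  | cons a l' ih =>
    rw [List.dropWhile_cons] at h
    split at h
    · exact ih h
    · next hp => cases h; simpa using hp

theorem pvAssemble (L core T : List Char) (h : core ≠ []) :
    [' '] ++ pvFlat L ++ core ++ [' '] ++ pvFlat T =
    [' '] ++ (pvFlat L ++ PySem.Chars.join [' '] (core :: T.map (fun c => [c]))) ++ [' '] := by
  have h2 := pvJoin_core_trailing core T h
  simp only [List.append_assoc] at h2 ⊢
  rw [← h2]

theorem seperate_puct_eq (text : String) : seperate_puct text = seperate_puct_alt text := by
  unfold seperate_puct seperate_puct_alt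
  simp only [pvLeadLoop_spec]
  generalize text.toList = cs
  by_cases h : cs.dropWhile pvIsPunct = []
  · -- the whole string is punctuation (or empty): the first loop consumes it all
    have hall : ∀ x ∈ cs, pvIsPunct x = true := List.dropWhile_eq_nil_iff.mp h
    have hLcs : cs.takeWhile pvIsPunct = cs := List.takeWhile_eq_self_iff.mpr hall
    rw [h, if_pos rfl, hLcs]
    have htail : pvTailLoop cs cs.length ([' '] ++ pvFlat cs) = [' '] ++ pvFlat cs := by
      rw [pvTailLoop_spec cs cs.length _ le_rfl (by simp)]
      rw [if_pos (by rw [List.take_length]; exact List.all_eq_true.mpr hall)]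
    rw [htail]
    have hrs : pvRStripPunct ([] : List Char) = [] := rfl
    rw [hrs]
    simp only [List.isEmpty_nil, if_true, List.length_nil, Nat.sub_zero, List.take_length,
      List.drop_nil, List.map_nil, List.append_nil, List.nil_append]
    cases hcs : cs with
    | nil => rfl
    | cons c cs' =>
      rw [← hcs, pvFlat_eq_join cs (by rw [hcs]; simp), ← List.append_assoc]
      exact congrArg String.mk (pvStrip_wrap _)
  · -- there is a non-punctuation character
    obtain ⟨c, rest, hcr⟩ := List.exists_cons_of_ne_nil h
    have hc : pvIsPunct c = false := pvDropWhile_head_false cs c rest hcr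
    have hRall : (cs.dropWhile pvIsPunct).all pvIsPunct = false := by
      rw [hcr, List.all_cons, hc]; rfl
    have hcore : pvRStripPunct (cs.dropWhile pvIsPunct) ≠ [] := by
      intro hnil
      have hrev : List.dropWhile pvIsPunct (cs.dropWhile pvIsPunct).reverse = [] := by
        have := congrArg List.reverse hnil
        simpa [pvRStripPunct] using this
      have hmem := List.dropWhile_eq_nil_iff.mp hrev
      have : pvIsPunct c = true := hmem c (by rw [hcr]; simp)
      rw [hc] at this; exact absurd this (by simp)
    rw [if_neg h]
    have htail : pvTailLoop (cs.dropWhile pvIsPunct) (cs.dropWhile pvIsPunct).length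
        ([' '] ++ pvFlat (cs.takeWhile pvIsPunct)) =
        [' '] ++ pvFlat (cs.takeWhile pvIsPunct) ++ pvRStripPunct (cs.dropWhile pvIsPunct) ++ [' '] ++
          pvFlat ((cs.dropWhile pvIsPunct).drop (pvRStripPunct (cs.dropWhile pvIsPunct)).length) := by
      rw [pvTailLoop_spec _ _ _ le_rfl (by simp), List.take_length]
      rw [if_neg (by rw [hRall]; simp)]
    rw [htail]
    have hsplit : cs.takeWhile pvIsPunct ++ cs.dropWhile pvIsPunct = cs :=
      List.takeWhile_append_dropWhile
    have hlen : cs.length = (cs.takeWhile pvIsPunct).length + (cs.dropWhile pvIsPunct).length := by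
      conv_lhs => rw [← hsplit]
      rw [List.length_append]
    have h1 : List.take (cs.takeWhile pvIsPunct).length
        (cs.takeWhile pvIsPunct ++ cs.dropWhile pvIsPunct) = cs.takeWhile pvIsPunct :=
      List.take_left
    rw [hsplit] at h1
    have hlead : cs.take (cs.length - (cs.dropWhile pvIsPunct).length) = cs.takeWhile pvIsPunct := by
      rw [show cs.length - (cs.dropWhile pvIsPunct).length = (cs.takeWhile pvIsPunct).length by omega]
      exact h1
    rw [hlead, if_neg (by simpa [List.isEmpty_iff] using hcore)]
    apply congrArg String.mk
    have hjoin : PySem.Chars.join [' ']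
        ((cs.takeWhile pvIsPunct).map (fun c => [c]) ++ [pvRStripPunct (cs.dropWhile pvIsPunct)] ++
          ((cs.dropWhile pvIsPunct).drop (pvRStripPunct (cs.dropWhile pvIsPunct)).length).map (fun c => [c])) =
        pvFlat (cs.takeWhile pvIsPunct) ++ PySem.Chars.join [' ']
          (pvRStripPunct (cs.dropWhile pvIsPunct) ::
            ((cs.dropWhile pvIsPunct).drop (pvRStripPunct (cs.dropWhile pvIsPunct)).length).map (fun c => [c])) := by
      rw [List.append_assoc]
      exact pvJoin_singletons_append _ _ (by simp)
    rw [hjoin, ← pvStrip_wrap (pvFlat (cs.takeWhile pvIsPunct) ++ PySem.Chars.join [' ']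
          (pvRStripPunct (cs.dropWhile pvIsPunct) ::
            ((cs.dropWhile pvIsPunct).drop (pvRStripPunct (cs.dropWhile pvIsPunct)).length).map (fun c => [c])))]
    apply congrArg PySem.Chars.strip
    have hl := pvAssemble (cs.takeWhile pvIsPunct) (pvRStripPunct (cs.dropWhile pvIsPunct))
      ((cs.dropWhile pvIsPunct).drop (pvRStripPunct (cs.dropWhile pvIsPunct)).length) hcore
    simp only [List.append_assoc] at hl ⊢
    exact hl

-- ===== VERDICT (by name: the statement is the Claim_ definition above) =====
theorem seperate_puct_spec : Claim_equal_seperate_puct := by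
  intro text _
  unfold Spec_seperate_puct
  exact seperate_puct_eq text
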